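-- pv_equiv track=rewrite | github.com/AAA0109/fx-convert-be | main/apps/core/utils/string.py | snake_to_title_case_with_acronyms
-- ===== SOURCE A (Python) =====
-- def snake_to_title_case_with_acronyms(snake_str):
--     # Split the string by underscores
--     words = snake_str.split('_')
--
--     # Process each word
--     processed_words = []
--     current_acronym = []
--
--     for word in words:
--         if word.isupper() and len(word) == 1:
--             # Collect single uppercase letters for acronyms
--             current_acronym.append(word)
--         else:
--             # If we have collected an acronym, add it to processed words
--             if current_acronym:
--                 processed_words.append(''.join(current_acronym))
--                 current_acronym = []
--
--             # Process the current word
--             if word.isupper():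
--                 processed_words.append(word)  # Keep all-uppercase words as is
--             else:
--                 processed_words.append(word.capitalize())
--
--     # Add any remaining acronym
--     if current_acronym:
--         processed_words.append(''.join(current_acronym))
--
--     # Join the words with spaces
--     return ' '.join(processed_words)
-- ===== SOURCE B (Python) =====
-- def snake_to_title_case_with_acronyms(snake_str):
--     # Run-scanning rewrite: group consecutive single uppercase letters by
--     # lookahead instead of A's buffer-and-flush state machine.
--     words = snake_str.split('_')
--     n = len(words)
--     tokens = []
--     i = 0
--     while i < n:
--         w = words[i]
--         if w.isupper() and len(w) == 1:
--             j = i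
--             while j < n and words[j].isupper() and len(words[j]) == 1:
--                 j += 1
--             tokens.append(''.join(words[i:j]))
--             i = j
--         else:
--             tokens.append(w if w.isupper() else w.capitalize())
--             i += 1
--     return ' '.join(tokens)
-- ===== Notes on version B (the rewrite author's own statement) =====
-- stated objective: alternative
-- what changed: Replaces A's buffer-and-flush state machine (pending-acronym list flushed on every non-acronym word and once more at the end) with a single run-scanning loop that groups a maximal run of single uppercase letters by lookahead and emits each token directly.
import Mathlib
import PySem

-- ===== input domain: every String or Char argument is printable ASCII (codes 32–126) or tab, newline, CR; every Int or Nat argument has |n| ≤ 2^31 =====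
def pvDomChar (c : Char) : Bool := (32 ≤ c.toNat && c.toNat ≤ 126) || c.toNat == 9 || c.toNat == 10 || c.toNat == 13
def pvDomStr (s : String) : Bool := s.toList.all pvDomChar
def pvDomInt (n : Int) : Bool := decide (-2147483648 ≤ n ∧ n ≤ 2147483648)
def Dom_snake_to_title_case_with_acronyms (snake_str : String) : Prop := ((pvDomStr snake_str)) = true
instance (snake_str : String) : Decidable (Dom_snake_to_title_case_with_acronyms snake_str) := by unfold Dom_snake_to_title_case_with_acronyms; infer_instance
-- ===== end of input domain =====

-- B replaces A's buffer-and-flush state machine with a run-scanning loop (alternative decomposition, same cost).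

-- shared per-word primitives (Python str.isupper / str.capitalize, on List Char; exact on the ASCII domain)
def pyIsUpper (cs : List Char) : Bool :=
  cs.any (fun c => PySem.Chars.isupper c || PySem.Chars.islower c) &&
  cs.all (fun c => !PySem.Chars.islower c)

def pyCapitalize (cs : List Char) : List Char :=
  match cs with
  | [] => []
  | c :: rest => PySem.Chars.upperChar c :: rest.map PySem.Chars.lowerChar

-- ===== PORT A =====
-- A's loop body: state = (processed_words, current_acronym)
def aStep (st : List (List Char) × List (List Char)) (w : List Char) :
    List (List Char) × List (List Char) :=
  if pyIsUpper w && w.length == 1 then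
    (st.1, st.2 ++ [w])
  else
    let processed := if st.2.isEmpty then st.1 else st.1 ++ [PySem.Chars.join [] st.2]
    (processed ++ [if pyIsUpper w then w else pyCapitalize w], [])

def snake_to_title_case_with_acronyms (snake_str : String) : String :=
  let words := PySem.Chars.splitOn snake_str.toList ['_']
  let st := words.foldl aStep ([], [])
  let processed := if st.2.isEmpty then st.1 else st.1 ++ [PySem.Chars.join [] st.2]
  String.ofList (PySem.Chars.join [' '] processed)

-- ===== PORT B =====
def bKey (w : List Char) : Bool := pyIsUpper w && w.length == 1

def bTokens (ws : List (List Char)) : List (List Char) :=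
  match ws with
  | [] => []
  | w :: rest =>
    if bKey w then
      PySem.Chars.join [] (w :: rest.takeWhile bKey) :: bTokens (rest.dropWhile bKey)
    else
      (if pyIsUpper w then w else pyCapitalize w) :: bTokens rest
termination_by ws.length
decreasing_by
  · exact Nat.lt_succ_of_le (rest.length_dropWhile_le bKey)
  · simp

def snake_to_title_case_with_acronyms_alt (snake_str : String) : String :=
  String.ofList (PySem.Chars.join [' '] (bTokens (PySem.Chars.splitOn snake_str.toList ['_'])))

-- ===== PRECONDITION & SPEC =====
def Spec_snake_to_title_case_with_acronyms (snake_str : String) (out : String) : Prop := out = snake_to_title_case_with_acronyms_alt snake_str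
instance (snake_str : String) (out : String) : Decidable (Spec_snake_to_title_case_with_acronyms snake_str out) := by unfold Spec_snake_to_title_case_with_acronyms; infer_instance

-- ===== CLAIM (what is proved, stated in full; the proofs are below) =====
def Claim_equal_snake_to_title_case_with_acronyms : Prop := ∀ (snake_str : String), Dom_snake_to_title_case_with_acronyms snake_str → Spec_snake_to_title_case_with_acronyms snake_str (snake_to_title_case_with_acronyms snake_str)

-- ===== LEMMAS AND PROOFS =====

-- pending-acronym buffer a merged with the leading key-run of ws
def tokensAux (a : List (List Char)) (ws : List (List Char)) : List (List Char) :=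
  if a.isEmpty then bTokens ws
  else PySem.Chars.join [] (a ++ ws.takeWhile bKey) :: bTokens (ws.dropWhile bKey)

theorem foldl_aStep_eq (ws : List (List Char)) : ∀ (p a : List (List Char)),
    (let st := ws.foldl aStep (p, a);
     if st.2.isEmpty then st.1 else st.1 ++ [PySem.Chars.join [] st.2]) = p ++ tokensAux a ws := by
  induction ws with
  | nil =>
    intro p a
    simp only [List.foldl_nil, tokensAux, List.takeWhile_nil, List.dropWhile_nil, List.append_nil]
    cases a <;> simp [bTokens]
  | cons w rest ih =>
    intro p a
    simp only [List.foldl_cons]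
    by_cases hk : bKey w = true
    · have hstep : aStep (p, a) w = (p, a ++ [w]) := by
        simp [bKey] at hk; simp [aStep, hk]
      rw [hstep, ih]
      have hne : (a ++ [w]).isEmpty = false := by simp
      cases ha : a.isEmpty with
      | true =>
        have : a = [] := by cases a <;> simp_all
        subst this
        simp [tokensAux, bTokens, hk]
      | false =>
        simp [tokensAux, ha, hne, hk]
    · have hk' : (pyIsUpper w && w.length == 1) = false := by
        simpa [bKey] using hk
      have hstep : aStep (p, a) w =
          ((if a.isEmpty then p else p ++ [PySem.Chars.join [] a]) ++
            [if pyIsUpper w then w else pyCapitalize w], []) := by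
        simp [aStep, hk']
      rw [hstep, ih]
      cases ha : a.isEmpty with
      | true =>
        have : a = [] := by cases a <;> simp_all
        subst this
        simp [tokensAux, bTokens, hk]
      | false =>
        simp [tokensAux, ha, hk, bTokens]

-- ===== VERDICT (by name: the statement is the Claim_ definition above) =====
theorem snake_to_title_case_with_acronyms_spec : Claim_equal_snake_to_title_case_with_acronyms := by
  intro s _
  unfold Spec_snake_to_title_case_with_acronyms snake_to_title_case_with_acronyms
    snake_to_title_case_with_acronyms_alt
  have h := foldl_aStep_eq (PySem.Chars.splitOn s.toList ['_']) [] []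
  simp only [tokensAux, List.isEmpty_nil, if_true, List.nil_append] at h
  simp only [h]
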